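-- pv_equiv track=rewrite | github.com/fengzhengzhan/FzzAI | game_action_HollowKnight_fzz/boss_hornet/Knight_Simple/DQN_knight_train.py | self_blood_number
-- ===== SOURCE A (Python) =====
-- def self_blood_number(self_gray):
--     self_blood = 0
--     range_set = False
--     for self_bd_num in self_gray[0]:
--         if self_bd_num > 215 and range_set:
--             self_blood += 1
--             range_set = False
--         elif self_bd_num < 55:
--             range_set = True
--     return self_blood
-- ===== SOURCE B (Python) =====
-- def self_blood_number(self_gray):
--     # event pass: keep only significant pixels, labelled 'L' (arm) or 'H' (fire)
--     events = ['L' if v < 55 else 'H' for v in self_gray[0] if v < 55 or v > 215]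
--     # collapse runs of identical consecutive labels
--     runs = []
--     for e in events:
--         if not runs or runs[-1] != e:
--             runs.append(e)
--     # count fires immediately preceded by an arm
--     return sum(1 for p, c in zip(runs, runs[1:]) if p == 'L' and c == 'H')
-- ===== Notes on version B (the rewrite author's own statement) =====
-- stated objective: alternative
-- what changed: Replaces A's single-pass flag automaton by a three-stage pipeline: filter pixels to L/H event labels, collapse equal consecutive labels into runs, then count adjacent L->H pairs in the run list.
import Mathlib
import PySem

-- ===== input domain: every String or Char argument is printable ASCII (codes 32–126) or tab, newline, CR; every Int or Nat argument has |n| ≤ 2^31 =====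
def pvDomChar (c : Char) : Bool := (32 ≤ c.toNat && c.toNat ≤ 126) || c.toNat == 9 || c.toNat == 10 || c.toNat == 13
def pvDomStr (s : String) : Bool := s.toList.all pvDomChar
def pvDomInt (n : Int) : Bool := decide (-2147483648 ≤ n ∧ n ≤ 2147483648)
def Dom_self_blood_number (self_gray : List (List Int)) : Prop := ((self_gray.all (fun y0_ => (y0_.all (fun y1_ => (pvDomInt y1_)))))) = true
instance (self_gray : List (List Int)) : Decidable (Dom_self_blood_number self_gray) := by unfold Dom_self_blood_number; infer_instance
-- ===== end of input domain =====

-- B replaces A's flag automaton by a filter/collapse/pairwise-count pipeline (alternative decomposition, same cost).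


-- ===== PORT A =====
def self_blood_number (self_gray : List (List Int)) : Int :=
  match PySem.List.pyGet? self_gray 0 with
  | none => 0   -- unreachable: Pre_ excludes the empty list (IndexError in Python)
  | some row =>
    (row.foldl (fun (st : Int × Bool) self_bd_num =>
      if self_bd_num > 215 && st.2 then (st.1 + 1, false)
      else if self_bd_num < 55 then (st.1, true)
      else st) (0, false)).1

-- ===== PORT B =====
def self_blood_number_alt (self_gray : List (List Int)) : Int :=
  match PySem.List.pyGet? self_gray 0 with
  | none => 0   -- unreachable: Pre_ excludes the empty list (IndexError in Python)
  | some row =>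
    let events : List Char :=
      (row.filter (fun v => v < 55 || v > 215)).map (fun v => if v < 55 then 'L' else 'H')
    let runs : List Char :=
      events.foldl (fun acc e => if acc = [] || acc.getLast? ≠ some e then acc ++ [e] else acc) []
    (runs.zip runs.tail).foldl (fun (n : Int) pc => if pc.1 = 'L' && pc.2 = 'H' then n + 1 else n) 0

-- ===== PRECONDITION & SPEC =====
-- Pre_ excludes exactly the empty outer list, on which Python A raises IndexError at self_gray[0].
def Pre_self_blood_number (self_gray : List (List Int)) : Prop := self_gray ≠ []
instance (self_gray : List (List Int)) : Decidable (Pre_self_blood_number self_gray) := by unfold Pre_self_blood_number; infer_instance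
def pvWitness_self_blood_number : List (List Int) := [[30, 100, 255, 20, 230]]
def Spec_self_blood_number (self_gray : List (List Int)) (out : Int) : Prop := out = self_blood_number_alt self_gray
instance (self_gray : List (List Int)) (out : Int) : Decidable (Spec_self_blood_number self_gray out) := by unfold Spec_self_blood_number; infer_instance

-- ===== CLAIM (what is proved, stated in full; the proofs are below) =====
def Claim_equal_self_blood_number : Prop := ∀ (self_gray : List (List Int)), Dom_self_blood_number self_gray → Pre_self_blood_number self_gray → Spec_self_blood_number self_gray (self_blood_number self_gray)

-- ===== LEMMAS AND PROOFS =====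

-- recursive characterisation of the pairwise L->H count
def zcount : List Char → Int
  | x :: y :: t => (if x = 'L' ∧ y = 'H' then 1 else 0) + zcount (y :: t)
  | _ => 0

theorem zfold_shift (l : List Char) (n : Int) :
    ((l.zip l.tail).foldl (fun (n : Int) pc => if pc.1 = 'L' && pc.2 = 'H' then n + 1 else n) n)
      = n + zcount l := by
  induction l generalizing n with
  | nil => simp [zcount]
  | cons x t ih =>
    cases t with
    | nil => simp [zcount]
    | cons y t' =>
      simp only [List.tail_cons, List.zip_cons_cons, List.foldl_cons, zcount] at ih ⊢
      rw [ih]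
      by_cases h : x = 'L' ∧ y = 'H' <;> (simp [h]; try ring)

theorem zcount_snoc (l : List Char) (e : Char) :
    zcount (l ++ [e]) = zcount l + (if l.getLast? = some 'L' ∧ e = 'H' then 1 else 0) := by
  induction l with
  | nil => simp [zcount]
  | cons x t ih =>
    cases t with
    | nil => simp [zcount]
    | cons y t' =>
      simp only [List.cons_append, zcount, List.getLast?_cons_cons] at ih ⊢
      rw [ih]
      ring

-- one collapse step
def cstep (acc : List Char) (e : Char) : List Char :=
  if acc = [] || acc.getLast? ≠ some e then acc ++ [e] else acc

-- main invariant: A's automaton vs. B's collapse-and-count, flag = "last run label is 'L'"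
theorem main_inv (row : List Int) (c : Int) (f : Bool) (acc : List Char)
    (hf : (acc.getLast? = some 'L') ↔ f = true) :
    (row.foldl (fun (st : Int × Bool) v =>
      if v > 215 && st.2 then (st.1 + 1, false)
      else if v < 55 then (st.1, true)
      else st) (c, f)).1 + zcount acc
    = c + zcount (((row.filter (fun v => v < 55 || v > 215)).map
        (fun v => if v < 55 then 'L' else 'H')).foldl cstep acc) := by
  induction row generalizing c f acc with
  | nil => simp
  | cons v t ih =>
    by_cases hlo : v < 55
    · -- event 'L'
      have hhi : ¬ v > 215 := by omega
      simp only [List.foldl_cons, List.filter_cons]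
      have : (decide (v < 55) || decide (v > 215)) = true := by simp [hlo]
      simp only [this, if_pos, List.map_cons, List.foldl_cons]
      rw [if_neg (by simp [hhi]), if_pos hlo, if_pos hlo]
      by_cases hL : acc.getLast? = some 'L'
      · -- duplicate 'L': collapse leaves acc unchanged
        have hcs : cstep acc 'L' = acc := by
          simp [cstep, hL]
          intro h; rw [h] at hL; simp at hL
        rw [hcs]
        exact ih c true acc (by simp [hL])
      · -- append 'L'
        have hcs : cstep acc 'L' = acc ++ ['L'] := by
          by_cases hne : acc = [] <;> simp [cstep, hne, hL]
        rw [hcs]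
        have := ih c true (acc ++ ['L']) (by simp)
        rw [zcount_snoc] at this
        rw [if_neg (by simp [hL])] at this
        omega
    · by_cases hhi : v > 215
      · -- event 'H'
        simp only [List.foldl_cons, List.filter_cons]
        have : (decide (v < 55) || decide (v > 215)) = true := by simp [hhi]
        simp only [this, if_pos, List.map_cons, List.foldl_cons]
        rw [if_neg hlo]
        by_cases hfl : f = true
        · -- flag set: A increments; B's last run is 'L', appends 'H'
          have hL : acc.getLast? = some 'L' := hf.mpr hfl
          rw [hfl, if_pos (by simp [hhi]), if_neg hlo]
          have hcs : cstep acc 'H' = acc ++ ['H'] := by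
            simp [cstep, hL]
          rw [hcs]
          have := ih (c + 1) false (acc ++ ['H']) (by simp)
          rw [zcount_snoc] at this
          rw [if_pos (by simp [hL])] at this
          omega
        · -- flag clear: A skips; B either dups 'H' or appends without counting
          have hnf : f = false := by cases f <;> simp_all
          rw [hnf]
          rw [if_neg (by simp)]
          rw [if_neg hlo]; try rw [if_neg hlo]
          have hnL : ¬ acc.getLast? = some 'L' := fun h => by
            have := hf.mp h; simp [hnf] at this
          by_cases hH : acc.getLast? = some 'H'
          · have hcs : cstep acc 'H' = acc := by
              simp [cstep, hH]
              intro h; rw [h] at hH; simp at hH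
            rw [hcs]
            exact ih c false acc (by simp [hnL])
          · have hcs : cstep acc 'H' = acc ++ ['H'] := by
              by_cases hne : acc = [] <;> simp [cstep, hne, hH]
            rw [hcs]
            have := ih c false (acc ++ ['H']) (by simp)
            rw [zcount_snoc] at this
            rw [if_neg (by simp [hnL])] at this
            omega
      · -- neutral pixel: A unchanged, B filters it out
        simp only [List.foldl_cons, List.filter_cons]
        have : (decide (v < 55) || decide (v > 215)) = false := by simp [hlo, hhi]
        simp only [this, Bool.false_eq_true, if_false]
        rw [if_neg (by simp [hhi]), if_neg hlo]
        exact ih c f acc hf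

-- ===== VERDICT (by name: the statement is the Claim_ definition above) =====
theorem self_blood_number_spec : Claim_equal_self_blood_number := by
  intro self_gray _ _
  unfold Spec_self_blood_number self_blood_number self_blood_number_alt
  cases h : PySem.List.pyGet? self_gray 0 with
  | none => rfl
  | some row =>
    dsimp only
    rw [zfold_shift]
    have hmain := main_inv row 0 false [] (by simp)
    simp only [zcount, Int.add_zero, Int.zero_add] at hmain
    rw [zero_add]
    exact hmain
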